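-- pv_equiv track=rewrite | github.com/anonymouspanda-23/psychic-octo-sniffle | q2.py | change_case_n_timesx
-- ===== SOURCE A (Python) =====
-- def change_case_n_timesx(text, n):
--     # Replace the code below with your implmentations.
--     if n == 0:
--         return text
--
--     str_list = list(text)
--     for i in range(len(str_list)):
--         if n == 0:
--             break
--
--         if str_list[i].isalpha():
--             str_list[i] = str_list[i].lower()
--             n -= 1
--
--     return ''.join(str_list)
-- ===== SOURCE B (Python) =====
-- def change_case_n_timesx(text, n):
--     # Find the index just past the n-th alphabetic character, then
--     # lowercase that prefix in bulk and keep the rest unchanged.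
--     if n == 0:
--         return text
--     cutoff = len(text)
--     if n > 0:
--         remaining = n
--         for i, ch in enumerate(text):
--             if ch.isalpha():
--                 remaining -= 1
--                 if remaining == 0:
--                     cutoff = i + 1
--                     break
--     return text[:cutoff].lower() + text[cutoff:]
-- ===== Notes on version B (the rewrite author's own statement) =====
-- stated objective: simpler
-- what changed: B replaces A's per-character list-mutation loop by computing the cutoff index just past the n-th alphabetic character and returning text[:cutoff].lower() + text[cutoff:] as one bulk operation.
import Mathlib
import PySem

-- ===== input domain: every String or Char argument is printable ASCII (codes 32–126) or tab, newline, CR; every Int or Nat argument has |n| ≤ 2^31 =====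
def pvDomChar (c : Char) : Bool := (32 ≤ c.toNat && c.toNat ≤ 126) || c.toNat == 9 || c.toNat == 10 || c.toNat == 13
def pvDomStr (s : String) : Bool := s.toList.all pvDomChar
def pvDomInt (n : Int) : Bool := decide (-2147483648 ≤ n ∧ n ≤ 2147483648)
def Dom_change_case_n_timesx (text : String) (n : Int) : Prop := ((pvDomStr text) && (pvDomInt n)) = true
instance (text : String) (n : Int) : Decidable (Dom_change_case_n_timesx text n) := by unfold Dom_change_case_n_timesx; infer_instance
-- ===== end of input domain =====

-- B replaces A's per-character list-mutation loop by a cutoff-index computation plus one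
-- bulk prefix-lowercase; objective: simpler.

-- ===== PORT A =====
-- the for-loop over str_list, carrying the remaining count n; 'break' returns the rest unchanged
def pvALoop : List Char → Int → List Char
  | [], _ => []
  | c :: rest, n =>
      if n == 0 then c :: rest
      else if PySem.Chars.isalpha c then
        PySem.Chars.lowerChar c :: pvALoop rest (n - 1)
      else c :: pvALoop rest n

def change_case_n_timesx (text : String) (n : Int) : String :=
  if n == 0 then text
  else String.mk (pvALoop text.toList n)

-- ===== PORT B =====
-- Source B's enumerate loop: index just past the n-th alphabetic character, none if fewer than n
def pvCutoff : List Char → Int → Nat → Option Nat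
  | [], _, _ => none
  | c :: rest, remaining, i =>
      if PySem.Chars.isalpha c then
        if remaining - 1 == 0 then some (i + 1)
        else pvCutoff rest (remaining - 1) (i + 1)
      else pvCutoff rest remaining (i + 1)

def change_case_n_timesx_alt (text : String) (n : Int) : String :=
  if n == 0 then text
  else
    let cs := text.toList
    let cutoff : Nat := if 0 < n then (pvCutoff cs n 0).getD cs.length else cs.length
    String.mk (PySem.Chars.lower (cs.take cutoff) ++ cs.drop cutoff)

-- ===== PRECONDITION & SPEC =====
def Spec_change_case_n_timesx (text : String) (n : Int) (out : String) : Prop := out = change_case_n_timesx_alt text n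
instance (text : String) (n : Int) (out : String) : Decidable (Spec_change_case_n_timesx text n out) := by unfold Spec_change_case_n_timesx; infer_instance

-- ===== CLAIM (what is proved, stated in full; the proofs are below) =====
def Claim_equal_change_case_n_timesx : Prop := ∀ (text : String) (n : Int), Dom_change_case_n_timesx text n → Spec_change_case_n_timesx text n (change_case_n_timesx text n)

-- ===== LEMMAS AND PROOFS =====

theorem pvALoop_zero (cs : List Char) : pvALoop cs 0 = cs := by
  cases cs <;> simp [pvALoop]

theorem lowerChar_of_not_alpha (c : Char) (h : PySem.Chars.isalpha c = false) :
    PySem.Chars.lowerChar c = c := by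
  simp [PySem.Chars.isalpha] at h
  simp [PySem.Chars.lowerChar, h.1]

theorem pvALoop_neg (cs : List Char) (n : Int) (h : n < 0) :
    pvALoop cs n = PySem.Chars.lower cs := by
  induction cs generalizing n with
  | nil => simp [pvALoop, PySem.Chars.lower]
  | cons c rest ih =>
      have hne : ¬ (n == 0) = true := by simp; omega
      by_cases ha : PySem.Chars.isalpha c = true
      · simp [pvALoop, hne, ha, PySem.Chars.lower, ih (n - 1) (by omega)]
      · simp only [Bool.not_eq_true] at ha
        simp [pvALoop, hne, ha, PySem.Chars.lower, ih n h,
          lowerChar_of_not_alpha c ha]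

theorem pvCutoff_shift (cs : List Char) (m : Int) (i : Nat) :
    pvCutoff cs m (i + 1) = (pvCutoff cs m i).map (· + 1) := by
  induction cs generalizing m i with
  | nil => simp [pvCutoff]
  | cons c rest ih =>
      by_cases ha : PySem.Chars.isalpha c = true
      · by_cases h1 : (m - 1 == 0) = true
        · simp [pvCutoff, ha, h1]
        · simp only [Bool.not_eq_true] at h1
          simp [pvCutoff, ha, h1, ih]
      · simp only [Bool.not_eq_true] at ha
        simp [pvCutoff, ha, ih]

theorem pvALoop_pos (cs : List Char) (n : Int) (h : 0 < n) :
    pvALoop cs n =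
      PySem.Chars.lower (cs.take ((pvCutoff cs n 0).getD cs.length)) ++
        cs.drop ((pvCutoff cs n 0).getD cs.length) := by
  induction cs generalizing n with
  | nil => simp [pvALoop, pvCutoff, PySem.Chars.lower]
  | cons c rest ih =>
      have hne : ¬ (n == 0) = true := by simp; omega
      by_cases ha : PySem.Chars.isalpha c = true
      · by_cases h1 : n = 1
        · subst h1
          simp [pvALoop, ha, pvCutoff, pvALoop_zero, PySem.Chars.lower]
        · have h1' : ¬ (n - 1 == 0) = true := by simp; omega
          have hk := ih (n - 1) (by omega)
          have hshift := pvCutoff_shift rest (n - 1) 0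
          cases hc : pvCutoff rest (n - 1) 0 with
          | none =>
              simp [hc] at hk hshift
              simp [pvALoop, hne, ha, pvCutoff, h1', hshift, hk, PySem.Chars.lower]
          | some k =>
              simp [hc] at hk hshift
              simp [pvALoop, hne, ha, pvCutoff, h1', hshift, hk, PySem.Chars.lower]
      · simp only [Bool.not_eq_true] at ha
        have hk := ih n h
        have hshift := pvCutoff_shift rest n 0
        cases hc : pvCutoff rest n 0 with
        | none =>
            simp [hc] at hk hshift
            simp [pvALoop, hne, ha, pvCutoff, hshift, hk, PySem.Chars.lower,
              lowerChar_of_not_alpha c ha]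
        | some k =>
            simp [hc] at hk hshift
            simp [pvALoop, hne, ha, pvCutoff, hshift, hk, PySem.Chars.lower,
              lowerChar_of_not_alpha c ha]

-- ===== VERDICT (by name: the statement is the Claim_ definition above) =====
theorem change_case_n_timesx_spec : Claim_equal_change_case_n_timesx := by
  intro text n _
  unfold Spec_change_case_n_timesx change_case_n_timesx change_case_n_timesx_alt
  by_cases h0 : n = 0
  · simp [h0]
  · have h0' : ¬ (n == 0) = true := by simp [h0]
    simp only [h0']
    rcases lt_or_gt_of_ne h0 with hneg | hpos
    · have : ¬ 0 < n := by omega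
      simp [this, pvALoop_neg text.toList n hneg, ← String.length_toList, List.take_length, List.drop_length]
    · simp [hpos, pvALoop_pos text.toList n hpos]
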